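-- pv_equiv track=rewrite | github.com/yutaofr/qqq-buyer-monitor | scripts/final_product_patch.py | _recovery_window_relapsed
-- ===== SOURCE A (Python) =====
-- from typing import Any
--
-- def _is_fast_cascade_boundary_triggered(row: dict[str, Any]) -> bool:
--     return bool(row.get("boundary_flag")) or row.get("dominant_stage") == "FAST_CASCADE_BOUNDARY"
--
-- def _is_high_stress_secondary(row: dict[str, Any]) -> bool:
--     return row.get("relapse_pressure") == "HIGH" and row.get("secondary_stage") == "STRESS"
--
-- def _recovery_window_relapsed(window: list[dict[str, Any]]) -> bool:
--     consecutive_high_stress_secondary = 0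
--     for row in window:
--         if row.get("dominant_stage") == "STRESS":
--             return True
--         if _is_fast_cascade_boundary_triggered(row):
--             return True
--         if _is_high_stress_secondary(row):
--             consecutive_high_stress_secondary += 1
--             if consecutive_high_stress_secondary >= 2:
--                 return True
--         else:
--             consecutive_high_stress_secondary = 0
--     return False
-- ===== SOURCE B (Python) =====
-- from typing import Any
--
-- def _is_fast_cascade_boundary_triggered(row: dict[str, Any]) -> bool:
--     return bool(row.get("boundary_flag")) or row.get("dominant_stage") == "FAST_CASCADE_BOUNDARY"
--
-- def _is_high_stress_secondary(row: dict[str, Any]) -> bool: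
--     return row.get("relapse_pressure") == "HIGH" and row.get("secondary_stage") == "STRESS"
--
-- def _recovery_window_relapsed(window: list[dict[str, Any]]) -> bool:
--     if any(row.get("dominant_stage") == "STRESS" or _is_fast_cascade_boundary_triggered(row)
--            for row in window):
--         return True
--     return any(_is_high_stress_secondary(a) and _is_high_stress_secondary(b)
--                for a, b in zip(window, window[1:]))
-- ===== Notes on version B (the rewrite author's own statement) =====
-- stated objective: simpler
-- what changed: Replaced the single early-exit loop with a mutable consecutive-high-stress counter by two stateless passes: any() over rows for immediate triggers, then any() over adjacent pairs (zip(window, window[1:])) for two consecutive high-stress-secondary rows.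
import Mathlib
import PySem

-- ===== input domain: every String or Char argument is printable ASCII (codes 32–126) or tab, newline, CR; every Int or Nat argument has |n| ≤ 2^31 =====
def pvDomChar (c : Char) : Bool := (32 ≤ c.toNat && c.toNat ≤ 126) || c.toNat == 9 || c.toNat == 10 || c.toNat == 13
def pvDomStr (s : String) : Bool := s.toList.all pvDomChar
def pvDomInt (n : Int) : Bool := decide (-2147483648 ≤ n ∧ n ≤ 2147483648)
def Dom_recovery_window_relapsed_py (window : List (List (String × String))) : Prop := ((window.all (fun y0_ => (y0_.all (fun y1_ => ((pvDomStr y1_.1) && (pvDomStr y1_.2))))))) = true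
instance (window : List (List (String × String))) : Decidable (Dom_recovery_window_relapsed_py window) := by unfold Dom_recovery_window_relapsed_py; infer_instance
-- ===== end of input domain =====

-- B replaces A's counter-carrying early-exit loop by two stateless any-passes (rows, then adjacent pairs); objective: simpler. Equal return value on all inputs.

-- ===== PORT A =====
-- row.get(k): dict lookup, None when absent
def pvRowGet (row : List (String × String)) (k : String) : Option String :=
  (PySem.Dict.mk row).get? k

-- bool(row.get("boundary_flag")): truthy iff present and nonempty string
def is_fast_cascade_boundary_triggered (row : List (String × String)) : Bool :=
  (match pvRowGet row "boundary_flag" with | none => false | some s => s.toList ≠ []) ||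
    (pvRowGet row "dominant_stage" == some "FAST_CASCADE_BOUNDARY")

def is_high_stress_secondary (row : List (String × String)) : Bool :=
  (pvRowGet row "relapse_pressure" == some "HIGH") &&
    (pvRowGet row "secondary_stage" == some "STRESS")

-- the for-loop of A, carrying the consecutive counter
def pvLoopA : List (List (String × String)) → Int → Bool
  | [], _ => false
  | row :: rest, c =>
    if pvRowGet row "dominant_stage" == some "STRESS" then true
    else if is_fast_cascade_boundary_triggered row then true
    else if is_high_stress_secondary row then
      (if c + 1 ≥ 2 then true else pvLoopA rest (c + 1))
    else pvLoopA rest 0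

def recovery_window_relapsed_py (window : List (List (String × String))) : Bool :=
  pvLoopA window 0

-- ===== PORT B =====
def is_fast_cascade_boundary_triggered_b (row : List (String × String)) : Bool :=
  (match pvRowGet row "boundary_flag" with | none => false | some s => s.toList ≠ []) ||
    (pvRowGet row "dominant_stage" == some "FAST_CASCADE_BOUNDARY")

def is_high_stress_secondary_b (row : List (String × String)) : Bool :=
  (pvRowGet row "relapse_pressure" == some "HIGH") &&
    (pvRowGet row "secondary_stage" == some "STRESS")

def recovery_window_relapsed_py_alt (window : List (List (String × String))) : Bool :=
  if window.any (fun row =>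
      (pvRowGet row "dominant_stage" == some "STRESS") ||
        is_fast_cascade_boundary_triggered_b row) then
    true
  else
    -- zip(window, window[1:]): window[1:] is window.drop 1 (exact for this nonneg slice)
    (window.zip (window.drop 1)).any (fun p =>
      is_high_stress_secondary_b p.1 && is_high_stress_secondary_b p.2)

-- ===== PRECONDITION & SPEC =====
def Spec_recovery_window_relapsed_py (window : List (List (String × String))) (out : Bool) : Prop := out = recovery_window_relapsed_py_alt window
instance (window : List (List (String × String))) (out : Bool) : Decidable (Spec_recovery_window_relapsed_py window out) := by unfold Spec_recovery_window_relapsed_py; infer_instance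

-- ===== CLAIM (what is proved, stated in full; the proofs are below) =====
def Claim_equal_recovery_window_relapsed_py : Prop := ∀ (window : List (List (String × String))), Dom_recovery_window_relapsed_py window → Spec_recovery_window_relapsed_py window (recovery_window_relapsed_py window)

-- ===== LEMMAS AND PROOFS =====

-- immediate-trigger predicate shared by the analysis
def pvImm (row : List (String × String)) : Bool :=
  (pvRowGet row "dominant_stage" == some "STRESS") || is_fast_cascade_boundary_triggered row

def pvTrig (l : List (List (String × String))) : Bool := l.any pvImm

def pvPairs (l : List (List (String × String))) : Bool :=
  (l.zip (l.drop 1)).any (fun p => is_high_stress_secondary p.1 && is_high_stress_secondary p.2)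

lemma pvPairs_cons (r : List (String × String)) (rs : List (List (String × String))) :
    pvPairs (r :: rs) =
      ((match rs.head? with
        | none => false
        | some r2 => is_high_stress_secondary r && is_high_stress_secondary r2) || pvPairs rs) := by
  cases rs <;> simp [pvPairs]

lemma pvLoopA_eq (l : List (List (String × String))) :
    pvLoopA l 0 = (pvTrig l || pvPairs l) ∧
    pvLoopA l 1 = (pvTrig l ||
      ((match l.head? with
        | none => false
        | some r => is_high_stress_secondary r) || pvPairs l)) := by
  induction l with
  | nil => simp [pvLoopA, pvTrig, pvPairs]
  | cons r rs ih =>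
    obtain ⟨ih0, ih1⟩ := ih
    constructor
    · by_cases hs : (pvRowGet r "dominant_stage" == some "STRESS") = true
      · simp [pvLoopA, hs, pvTrig, pvImm]
      · by_cases hf : is_fast_cascade_boundary_triggered r = true
        · simp [pvLoopA, hs, hf, pvTrig, pvImm]
        · by_cases hh : is_high_stress_secondary r = true
          · have heq : pvLoopA (r :: rs) 0 = pvLoopA rs 1 := by
              simp [pvLoopA, hs, hf, hh]
            rw [heq, ih1, pvPairs_cons]
            simp only [pvTrig, List.any_cons, pvImm, hh]
            cases rs <;> simp_all [beq_eq_decide, Bool.or_assoc, Bool.or_comm, Bool.or_left_comm]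
          · have heq : pvLoopA (r :: rs) 0 = pvLoopA rs 0 := by
              simp [pvLoopA, hs, hf, hh]
            rw [heq, ih0, pvPairs_cons]
            simp only [pvTrig, List.any_cons, pvImm, hh]
            cases rs <;> simp_all [beq_eq_decide]
    · by_cases hs : (pvRowGet r "dominant_stage" == some "STRESS") = true
      · simp [pvLoopA, hs, pvTrig, pvImm]
      · by_cases hf : is_fast_cascade_boundary_triggered r = true
        · simp [pvLoopA, hs, hf, pvTrig, pvImm]
        · by_cases hh : is_high_stress_secondary r = true
          · simp [pvLoopA, hs, hf, hh, pvTrig, pvImm]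
          · have heq : pvLoopA (r :: rs) 1 = pvLoopA rs 0 := by
              simp [pvLoopA, hs, hf, hh]
            rw [heq, ih0, pvPairs_cons]
            simp only [pvTrig, List.any_cons, pvImm, hh]
            cases rs <;> simp_all [beq_eq_decide]

lemma alt_eq (window : List (List (String × String))) :
    recovery_window_relapsed_py_alt window = (pvTrig window || pvPairs window) := by
  have h1 : recovery_window_relapsed_py_alt window =
      (if pvTrig window = true then true else pvPairs window) := rfl
  rw [h1]; cases hp : pvTrig window <;> simp

-- ===== VERDICT (by name: the statement is the Claim_ definition above) =====
theorem recovery_window_relapsed_py_spec : Claim_equal_recovery_window_relapsed_py := by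
  intro window _
  unfold Spec_recovery_window_relapsed_py recovery_window_relapsed_py
  rw [alt_eq, (pvLoopA_eq window).1]
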